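-- pv_equiv track=rewrite | github.com/AxJar/Python-Basics | Python/1/Proyectos/2do Parcial/Tarea6.py | matriz_secuencia
-- ===== SOURCE A (Python) =====
-- def matriz_secuencia(n):
--     cont = 1
--     matriz = []
--     for i in range(n):
--         lista = []
--         for j in range(n):
--             lista.append(cont)
--             cont += 1
--         matriz.append(lista)
--     return matriz
-- ===== SOURCE B (Python) =====
-- def matriz_secuencia(n):
--     if n <= 0:
--         return []
--     nums = list(range(1, n * n + 1))
--     matriz = []
--     start = 0
--     while start < len(nums):
--         matriz.append(nums[start:start + n])
--         start += n
--     return matriz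
-- ===== Notes on version B (the rewrite author's own statement) =====
-- stated objective: alternative
-- what changed: B first materialises the whole 1..n*n sequence as one flat list and then partitions it into rows with a while loop that slices n-element windows at a moving start index, instead of A's nested counting loops that append element by element.
import Mathlib
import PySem

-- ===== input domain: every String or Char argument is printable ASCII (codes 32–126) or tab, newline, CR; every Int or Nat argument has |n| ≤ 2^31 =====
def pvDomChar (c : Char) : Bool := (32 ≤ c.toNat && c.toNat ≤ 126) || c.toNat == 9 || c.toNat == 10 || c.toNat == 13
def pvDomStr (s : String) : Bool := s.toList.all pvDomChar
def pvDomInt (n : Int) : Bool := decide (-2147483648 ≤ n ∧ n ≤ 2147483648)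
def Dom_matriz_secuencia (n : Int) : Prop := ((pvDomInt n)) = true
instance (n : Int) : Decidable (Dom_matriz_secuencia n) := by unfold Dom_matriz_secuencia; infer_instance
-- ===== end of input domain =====

-- B builds the flat sequence 1..n*n once and then partitions it into rows by repeated prefix slicing (alternative decomposition, same cost).

-- ===== PORT A =====
def matriz_secuencia (n : Int) : List (List Int) :=
  -- cont = 1; matriz = []; nested for-loops appending
  let res := (PySem.List.pyRange 0 n 1).foldl
    (fun (st : Int × List (List Int)) _i =>
      let inner := (PySem.List.pyRange 0 n 1).foldl
        (fun (st2 : Int × List Int) _j => (st2.1 + 1, st2.2 ++ [st2.1])) (st.1, [])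
      (inner.1, st.2 ++ [inner.2]))
    ((1 : Int), ([] : List (List Int)))
  res.2

-- ===== PORT B =====
-- 'start = 0; while start < len(nums): matriz.append(nums[start:start+n]); start += n'
-- the 1 ≤ nn proof argument only justifies termination of the while loop
def pvChunk (nn : Int) (hn : 1 ≤ nn) (nums : List Int) (start : Int)
    (acc : List (List Int)) : List (List Int) :=
  if start < nums.length then
    pvChunk nn hn nums (start + nn)
      (acc ++ [PySem.List.slice nums (some start) (some (start + nn))])
  else acc
termination_by (nums.length - start).toNat
decreasing_by omega

def matriz_secuencia_alt (n : Int) : List (List Int) :=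
  if h : n ≤ 0 then []
  else pvChunk n (by omega) (PySem.List.pyRange 1 (n * n + 1) 1) 0 []

-- ===== PRECONDITION & SPEC =====
def Spec_matriz_secuencia (n : Int) (out : List (List Int)) : Prop := out = matriz_secuencia_alt n
instance (n : Int) (out : List (List Int)) : Decidable (Spec_matriz_secuencia n out) := by unfold Spec_matriz_secuencia; infer_instance

-- ===== CLAIM (what is proved, stated in full; the proofs are below) =====
def Claim_equal_matriz_secuencia : Prop := ∀ (n : Int), Dom_matriz_secuencia n → Spec_matriz_secuencia n (matriz_secuencia n)

-- ===== LEMMAS AND PROOFS =====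

-- canonical form: row i is [i*m+1, …, i*m+m]
def pvCanon (m : Nat) : List (List Int) :=
  (List.range m).map (fun i => (List.range m).map (fun j => ((i * m + j + 1 : Nat) : Int)))

theorem pv_inner (l : List Int) :
    ∀ (c : Int) (acc : List Int),
      l.foldl (fun (st2 : Int × List Int) _j => (st2.1 + 1, st2.2 ++ [st2.1])) (c, acc)
        = (c + l.length, acc ++ (List.range l.length).map (fun (j : Nat) => c + (j : Int))) := by
  induction l with
  | nil => intro c acc; simp
  | cons x l ih =>
    intro c acc
    simp only [List.foldl_cons, ih, List.length_cons, Prod.mk.injEq]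
    refine ⟨by push_cast; ring, ?_⟩
    rw [List.range_succ_eq_map, List.map_cons, List.map_map, List.append_assoc,
      List.singleton_append]
    congr 1
    congr 1
    · simp
    · apply List.map_congr_left
      intro j _
      simp only [Function.comp_apply]; push_cast; ring

theorem pv_outer (R : List Int) (l : List Int) :
    ∀ (c : Int) (acc : List (List Int)),
      l.foldl (fun (st : Int × List (List Int)) _i =>
          let inner := R.foldl
            (fun (st2 : Int × List Int) _j => (st2.1 + 1, st2.2 ++ [st2.1])) (st.1, [])
          (inner.1, st.2 ++ [inner.2])) (c, acc)
        = (c + l.length * R.length,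
           acc ++ (List.range l.length).map (fun (i : Nat) =>
             (List.range R.length).map (fun (j : Nat) => c + (i : Int) * R.length + (j : Int)))) := by
  induction l with
  | nil => intro c acc; simp
  | cons x l ih =>
    intro c acc
    rw [List.foldl_cons]
    simp only [pv_inner R c, ih, List.length_cons, Prod.mk.injEq]
    refine ⟨by push_cast; ring, ?_⟩
    rw [List.range_succ_eq_map, List.map_cons, List.map_map, List.append_assoc,
      List.singleton_append]
    congr 1
    congr 1
    · apply List.map_congr_left
      intro j _; push_cast; ring
    · apply List.map_congr_left
      intro i _
      simp only [Function.comp_apply]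
      apply List.map_congr_left
      intro j _; push_cast; ring

theorem pv_A_canon (n : Int) (h : 0 ≤ n) : matriz_secuencia n = pvCanon n.toNat := by
  unfold matriz_secuencia pvCanon
  simp only [pv_outer, PySem.List.length_pyRange_one, List.nil_append]
  have hn : (n - 0).toNat = n.toNat := by omega
  rw [hn]
  apply List.map_congr_left
  intro i _
  apply List.map_congr_left
  intro j _
  push_cast; ring

-- the while loop turns the flat list into rows of take/drop windows
theorem pvChunk_spec (nn : Int) (hn : 1 ≤ nn) (nums : List Int) :
    ∀ (k start : Nat) (acc : List (List Int)),
      nums.length = start + k * nn.toNat →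
      pvChunk nn hn nums (start : Int) acc
        = acc ++ (List.range k).map (fun i => ((nums.drop (start + i * nn.toNat)).take nn.toNat)) := by
  intro k
  induction k with
  | zero =>
    intro start acc hlen
    rw [pvChunk.eq_def]
    rw [if_neg (by omega)]
    simp
  | succ k ih =>
    intro start acc hlen
    have h1 : 1 ≤ nn.toNat := by omega
    have hmul : (k + 1) * nn.toNat = k * nn.toNat + nn.toNat := by ring
    rw [pvChunk.eq_def]
    rw [if_pos (by
      have hpos : 0 < (k + 1) * nn.toNat := Nat.mul_pos (Nat.succ_pos k) (by omega)
      omega)]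
    have hs : (start : Int) + nn = (start : Int) + (nn.toNat : Int) := by omega
    rw [hs, PySem.List.slice_natCast_add]
    have ih' := ih (start + nn.toNat) (acc ++ [(nums.drop start).take nn.toNat]) (by omega)
    push_cast at ih'
    rw [ih']
    rw [List.range_succ_eq_map, List.map_cons, List.map_map, List.append_assoc,
      List.singleton_append]
    congr 2
    · simp
    · apply List.map_congr_left
      intro i _
      simp only [Function.comp_apply]
      congr 2
      rw [Nat.succ_eq_add_one]; ring

-- window i of the flat range is row i
theorem pv_row_eq (m i : Nat) (hi : i < m) (f : Nat → Int) :
    (((List.range (m * m)).map f).drop (i * m)).take m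
      = (List.range m).map (fun j => f (i * m + j)) := by
  have hle : i * m + m ≤ m * m := by nlinarith
  have hsplit : m * m = i * m + (m * m - i * m) := by omega
  rw [← List.map_drop, ← List.map_take]
  conv_lhs => rw [hsplit, List.range_add]
  rw [List.drop_left' (List.length_range), ← List.map_take, List.take_range,
    min_eq_left (by omega), List.map_map]
  apply List.map_congr_left
  intro j _
  simp only [Function.comp_apply]

theorem pv_B_canon (n : Int) (h : 1 ≤ n) : matriz_secuencia_alt n = pvCanon n.toNat := by
  unfold matriz_secuencia_alt
  rw [dif_neg (by omega)]
  have ht : (n * n + 1 - 1).toNat = n.toNat * n.toNat := by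
    have he : n * n + 1 - 1 = ((n.toNat * n.toNat : Nat) : Int) := by
      push_cast [Int.toNat_of_nonneg (show (0:Int) ≤ n by omega)]; ring
    rw [he, Int.toNat_natCast]
  rw [PySem.List.pyRange_one 1 (n * n + 1), ht]
  have hsp := pvChunk_spec n (by omega)
    ((List.range (n.toNat * n.toNat)).map (fun (k : Nat) => (1 : Int) + (k : Int)))
    n.toNat 0 [] (by simp)
  simp only [Nat.cast_zero, Nat.zero_add, List.nil_append] at hsp
  rw [hsp]
  unfold pvCanon
  apply List.map_congr_left
  intro i hi
  rw [List.mem_range] at hi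
  rw [pv_row_eq n.toNat i hi]
  apply List.map_congr_left
  intro j _
  push_cast; ring

-- ===== VERDICT (by name: the statement is the Claim_ definition above) =====
theorem matriz_secuencia_spec : Claim_equal_matriz_secuencia := by
  intro n _
  unfold Spec_matriz_secuencia
  by_cases h : 1 ≤ n
  · rw [pv_A_canon n (by omega), pv_B_canon n h]
  · have h1 : PySem.List.pyRange 0 n 1 = [] := PySem.List.pyRange_one_eq_nil (by omega)
    simp [matriz_secuencia, matriz_secuencia_alt, h1, (by omega : n ≤ 0)]
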